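-- pv_equiv track=rewrite | github.com/metageek/adder | adder/compiler.py | tagWithIsLast
-- ===== SOURCE A (Python) =====
-- def tagWithIsLast(g):
--     prev=None
--     prevValid=False
--     for x in g:
--         if prevValid:
--             yield (prev,False)
--         prev=x
--         prevValid=True
--     if prevValid:
--         yield (prev,True)
-- ===== SOURCE B (Python) =====
-- def tagWithIsLast(g):
--     lst = list(g)
--     n = len(lst)
--     for i, x in enumerate(lst):
--         yield (x, i == n - 1)
-- ===== Notes on version B (the rewrite author's own statement) =====
-- stated objective: alternative
-- what changed: B materializes the input and tags each element by comparing its index with len-1 (enumerate over a list), instead of A's streaming one-element look-behind with a prevValid flag.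
import Mathlib
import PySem

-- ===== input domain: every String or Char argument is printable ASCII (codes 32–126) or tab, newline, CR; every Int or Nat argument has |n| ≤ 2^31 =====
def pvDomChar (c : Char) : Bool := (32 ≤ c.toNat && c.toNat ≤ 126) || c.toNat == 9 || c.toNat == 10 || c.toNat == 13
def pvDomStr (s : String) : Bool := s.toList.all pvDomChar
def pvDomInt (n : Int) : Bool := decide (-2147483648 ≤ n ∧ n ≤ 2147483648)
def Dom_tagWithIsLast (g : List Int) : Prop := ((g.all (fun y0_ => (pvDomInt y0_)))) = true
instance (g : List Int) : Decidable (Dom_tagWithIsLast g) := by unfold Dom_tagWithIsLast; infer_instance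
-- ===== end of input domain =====

-- B tags each element by comparing its index with len-1 over the materialized list,
-- instead of A's streaming look-behind with a prevValid flag; same O(n) cost.

-- ===== PORT A =====
-- A's loop carries (accumulated yields, prev, prevValid); prev=None is represented by 0
-- (never yielded while prevValid is false, so the value is irrelevant).
def tagWithIsLast (g : List Int) : List (Int × Bool) :=
  let s := g.foldl
    (fun (st : List (Int × Bool) × Int × Bool) x =>
      let acc := if st.2.2 then st.1 ++ [(st.2.1, false)] else st.1
      (acc, x, true))
    ([], 0, false)
  if s.2.2 then s.1 ++ [(s.2.1, true)] else s.1

-- ===== PORT B =====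
-- 'for i, x in enumerate(lst): yield (x, i == n-1)' with n = len(lst)
def tagWithIsLast_altEnum (n : Nat) (i : Nat) : List Int → List (Int × Bool)
  | [] => []
  | x :: xs => (x, decide (i = n - 1)) :: tagWithIsLast_altEnum n (i + 1) xs

def tagWithIsLast_alt (g : List Int) : List (Int × Bool) :=
  let lst := g
  let n := lst.length
  tagWithIsLast_altEnum n 0 lst

-- ===== PRECONDITION & SPEC =====
def Spec_tagWithIsLast (g : List Int) (out : List (Int × Bool)) : Prop := out = tagWithIsLast_alt g
instance (g : List Int) (out : List (Int × Bool)) : Decidable (Spec_tagWithIsLast g out) := by unfold Spec_tagWithIsLast; infer_instance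

-- ===== CLAIM (what is proved, stated in full; the proofs are below) =====
def Claim_equal_tagWithIsLast : Prop := ∀ (g : List Int), Dom_tagWithIsLast g → Spec_tagWithIsLast g (tagWithIsLast g)

-- ===== LEMMAS AND PROOFS =====
-- look-behind form both ports reduce to
def pvLook (prev : Int) : List Int → List (Int × Bool)
  | [] => [(prev, true)]
  | x :: it => (prev, false) :: pvLook x it

theorem tagWithIsLast_fold_valid (it : List Int) (acc : List (Int × Bool)) (prev : Int) :
    (let s := it.foldl
        (fun (st : List (Int × Bool) × Int × Bool) x =>
          let acc := if st.2.2 then st.1 ++ [(st.2.1, false)] else st.1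
          (acc, x, true))
        (acc, prev, true)
     if s.2.2 then s.1 ++ [(s.2.1, true)] else s.1)
    = acc ++ pvLook prev it := by
  induction it generalizing acc prev with
  | nil => simp [pvLook]
  | cons x it ih =>
      simp only [List.foldl_cons, pvLook]
      rw [ih]
      simp

theorem tagWithIsLast_enum_look (it : List Int) (x : Int) (i n : Nat)
    (h : i + 1 + it.length = n) :
    tagWithIsLast_altEnum n i (x :: it) = pvLook x it := by
  induction it generalizing i x with
  | nil =>
      have hi : i = n - 1 := by simp at h; omega
      simp [tagWithIsLast_altEnum, pvLook, hi]
  | cons y ys ih =>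
      have hi : ¬ (i = n - 1) := by simp at h; omega
      simp only [tagWithIsLast_altEnum, pvLook, hi]
      exact congrArg _ (ih y (i + 1) (by simp at h ⊢; omega))

-- ===== VERDICT (by name: the statement is the Claim_ definition above) =====
theorem tagWithIsLast_spec : Claim_equal_tagWithIsLast := by
  intro g _
  unfold Spec_tagWithIsLast tagWithIsLast tagWithIsLast_alt
  cases g with
  | nil => simp [tagWithIsLast_altEnum]
  | cons x it =>
      rw [tagWithIsLast_enum_look it x 0 (x :: it).length (by simp; omega)]
      simpa using tagWithIsLast_fold_valid it [] x
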